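-- pv_equiv track=rewrite | github.com/kstawiski/rtpipeline | scripts/anonymize_pipeline_results.py | dedupe_replacements
-- ===== SOURCE A (Python) =====
-- from typing import Any, Dict, Iterable, List, Optional, Sequence, Tuple
--
-- def dedupe_replacements(replacements: Sequence[Tuple[str, str]]) -> List[Tuple[str, str]]:
--     seen: set[Tuple[str, str]] = set()
--     ordered: List[Tuple[str, str]] = []
--     for pair in sorted(replacements, key=lambda p: len(p[0]), reverse=True):
--         if not pair[0]:
--             continue
--         if pair not in seen:
--             seen.add(pair)
--             ordered.append(pair)
--     return ordered
-- ===== SOURCE B (Python) =====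
-- def dedupe_replacements(replacements):
--     buckets = {}
--     for pair in replacements:
--         if pair[0]:
--             buckets.setdefault(len(pair[0]), []).append(pair)
--     result = []
--     seen = set()
--     for length in sorted(buckets, reverse=True):
--         for pair in buckets[length]:
--             if pair not in seen:
--                 seen.add(pair)
--                 result.append(pair)
--     return result
-- ===== Notes on version B (the rewrite author's own statement) =====
-- stated objective: alternative
-- what changed: A comparison-sorts the whole pair list by key length (stable, descending) and then walks it once filtering empty keys and deduping with a seen-set; B never sorts the pairs: it groups non-empty-key pairs into a dict of buckets keyed by key length, sorts only the distinct lengths descending, and emits the buckets in that order with first-seen dedup.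
import Mathlib
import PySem

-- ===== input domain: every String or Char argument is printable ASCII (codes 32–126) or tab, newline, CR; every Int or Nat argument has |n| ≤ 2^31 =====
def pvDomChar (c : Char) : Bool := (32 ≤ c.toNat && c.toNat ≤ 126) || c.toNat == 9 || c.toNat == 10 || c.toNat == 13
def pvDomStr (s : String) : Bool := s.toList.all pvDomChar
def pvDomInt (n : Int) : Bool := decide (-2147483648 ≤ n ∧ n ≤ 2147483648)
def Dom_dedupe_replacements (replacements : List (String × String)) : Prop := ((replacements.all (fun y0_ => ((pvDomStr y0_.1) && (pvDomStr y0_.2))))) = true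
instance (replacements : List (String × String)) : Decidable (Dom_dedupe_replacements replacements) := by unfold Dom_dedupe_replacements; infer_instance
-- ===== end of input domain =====

-- B replaces A's comparison sort of the whole pair list by a bucket/group-by pass: pairs with non-empty
-- keys are grouped into a dict of buckets keyed by key length, only the distinct lengths are sorted
-- (descending), and the buckets are emitted in that order with a first-seen dedup; objective: alternative.

-- ===== PORT A =====
def dedupe_replacements (replacements : List (String × String)) : List (String × String) :=
  -- seen = set(); ordered = []
  -- for pair in sorted(replacements, key=lambda p: len(p[0]), reverse=True): …
  (List.foldl
    (fun (st : PySem.Set (String × String) × List (String × String)) pair =>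
      if pair.1 == "" then st                       -- if not pair[0]: continue
      else if st.1.contains pair then st            -- if pair not in seen: …
      else (st.1.add pair, st.2 ++ [pair]))         -- seen.add(pair); ordered.append(pair)
    (PySem.Set.empty, [])
    (PySem.List.sorted replacements (fun p => PySem.Str.len p.1) true)).2

-- ===== PORT B =====
-- buckets = {}
-- for pair in replacements:
--     if pair[0]: buckets.setdefault(len(pair[0]), []).append(pair)
--   (setdefault(k, []) followed by .append(pair) is exactly buckets[k] = buckets.get(k, []) + [pair],
--    i.e. Dict.modify with default [])
def pvBucketsOf (replacements : List (String × String)) : PySem.Dict Int (List (String × String)) :=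
  List.foldl
    (fun d pair =>
      if pair.1 == "" then d
      else d.modify (PySem.Str.len pair.1) [] (fun v => v ++ [pair]))
    PySem.Dict.empty replacements

def dedupe_replacements_alt (replacements : List (String × String)) : List (String × String) :=
  -- result = []; seen = set()
  -- for length in sorted(buckets, reverse=True):
  --     for pair in buckets[length]: if pair not in seen: seen.add(pair); result.append(pair)
  --   (buckets[length] is exact as getD: length is drawn from buckets' own keys, so no KeyError)
  (List.foldl
    (fun (st : PySem.Set (String × String) × List (String × String)) length =>
      List.foldl
        (fun st pair =>
          if st.1.contains pair then st
          else (st.1.add pair, st.2 ++ [pair]))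
        st ((pvBucketsOf replacements).getD length []))
    (PySem.Set.empty, [])
    (PySem.List.sorted (pvBucketsOf replacements).keys (fun k => k) true)).2

-- ===== PRECONDITION & SPEC =====
def Spec_dedupe_replacements (replacements : List (String × String)) (out : List (String × String)) : Prop := out = dedupe_replacements_alt replacements
instance (replacements : List (String × String)) (out : List (String × String)) : Decidable (Spec_dedupe_replacements replacements out) := by unfold Spec_dedupe_replacements; infer_instance

-- ===== CLAIM (what is proved, stated in full; the proofs are below) =====
def Claim_equal_dedupe_replacements : Prop := ∀ (replacements : List (String × String)), Dom_dedupe_replacements replacements → Spec_dedupe_replacements replacements (dedupe_replacements replacements)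

-- ===== LEMMAS AND PROOFS =====

-- the comparison used by the reverse sort of the pairs: "a goes before b" (b's key strictly smaller)
def pvBef {α : Type} (key : α → Int) : α → α → Bool := fun a b => decide (key b < key a)

-- the bucket of key value k, and the buckets laid out along a list of key values
def pvBucket {α : Type} (f : α → Int) (F : List α) (k : Int) : List α :=
  F.filter (fun x => f x == k)

def pvBlocks {α : Type} (f : α → Int) (F : List α) (K : List Int) : List α :=
  K.flatMap (pvBucket f F)

theorem pv_insertBy_cons {α : Type} (bef : α → α → Bool) (x a : α) (t : List α) :
    PySem.List.insertBy bef x (a :: t)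
      = if bef x a then x :: a :: t else a :: PySem.List.insertBy bef x t := rfl

theorem pv_contains_iff {α : Type} [BEq α] [LawfulBEq α] (s : List α) (x : α) :
    s.contains x = true ↔ x ∈ s := by simp [List.contains_eq_mem]

theorem pv_add_of_mem {α : Type} [BEq α] [LawfulBEq α] (s : PySem.Set α) (x : α)
    (h : x ∈ s) : PySem.Set.add s x = s := by
  simp [PySem.Set.add, PySem.Set.contains, List.contains_eq_mem, h]

theorem pv_add_of_not_mem {α : Type} [BEq α] [LawfulBEq α] (s : PySem.Set α) (x : α)
    (h : x ∉ s) : PySem.Set.add s x = s ++ [x] := by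
  rw [PySem.Set.add, if_neg]
  simp [PySem.Set.contains, List.contains_eq_mem, h]

theorem pv_ofList_snoc {α : Type} [BEq α] (l : List α) (x : α) :
    PySem.Set.ofList (l ++ [x]) = PySem.Set.add (PySem.Set.ofList l) x := by
  rw [PySem.Set.ofList, List.foldl_append]; rfl

-- insert before a list all of whose members compare true
theorem pv_insertBy_all_before {α : Type} (key : α → Int) (x : α) (L : List α)
    (h : ∀ b ∈ L, pvBef key x b = true) :
    PySem.List.insertBy (pvBef key) x L = x :: L := by
  cases L with
  | nil => rfl
  | cons y ys => rw [pv_insertBy_cons, if_pos (h y (by simp))]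

theorem pv_insertBy_append {α : Type} (key : α → Int) (x : α) (s₁ s₂ : List α)
    (h₁ : ∀ a ∈ s₁, pvBef key x a = false) (h₂ : ∀ a ∈ s₂, pvBef key x a = true) :
    PySem.List.insertBy (pvBef key) x (s₁ ++ s₂) = s₁ ++ x :: s₂ := by
  induction s₁ with
  | nil => simpa using pv_insertBy_all_before key x s₂ h₂
  | cons a rest ih =>
    have ha : pvBef key x a = false := h₁ a (by simp)
    rw [List.cons_append, pv_insertBy_cons, if_neg (by simp [ha]),
      ih (fun b hb => h₁ b (by simp [hb]))]
    rfl

-- filtering past an inserted element the filter drops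
theorem pv_filter_insertBy_neg {α : Type} (key : α → Int) (q : α → Bool) (x : α) (t : List α)
    (hx : q x = false) :
    (PySem.List.insertBy (pvBef key) x t).filter q = t.filter q := by
  induction t with
  | nil => simp [PySem.List.insertBy, hx]
  | cons a t' ih =>
    by_cases hb : pvBef key x a = true
    · rw [pv_insertBy_cons, if_pos hb, List.filter_cons, if_neg (by simp [hx])]
    · rw [pv_insertBy_cons, if_neg hb, List.filter_cons, List.filter_cons]
      split <;> simp [ih]

-- filtering commutes with insertion into a key-descending list
theorem pv_filter_insertBy_pos {α : Type} (key : α → Int) (q : α → Bool) (x : α) (t : List α)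
    (hx : q x = true) (hs : t.Pairwise (fun a b => key b ≤ key a)) :
    (PySem.List.insertBy (pvBef key) x t).filter q
      = PySem.List.insertBy (pvBef key) x (t.filter q) := by
  induction t with
  | nil => simp [PySem.List.insertBy, hx]
  | cons a t' ih =>
    rcases List.pairwise_cons.mp hs with ⟨hhead, htail⟩
    by_cases hb : pvBef key x a = true
    · have hall : ∀ b ∈ (a :: t').filter q, pvBef key x b = true := by
        intro b hbmem
        have hbmem' := List.mem_of_mem_filter hbmem
        rcases List.mem_cons.mp hbmem' with rfl | hbt
        · exact hb
        · have hba : key b ≤ key a := hhead b hbt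
          have hax : key a < key x := by simpa [pvBef] using hb
          simp only [pvBef, decide_eq_true_eq]; omega
      rw [pv_insertBy_cons, if_pos hb, pv_insertBy_all_before key x _ hall,
        List.filter_cons, if_pos hx]
    · rw [pv_insertBy_cons, if_neg hb, List.filter_cons, List.filter_cons]
      by_cases hqa : q a = true
      · rw [if_pos hqa, if_pos hqa, ih htail, pv_insertBy_cons, if_neg hb]
      · rw [if_neg hqa, if_neg hqa, ih htail]

-- appending one element to the list being reverse-sorted is one insertion
theorem pv_sorted_snoc {α : Type} (key : α → Int) (m : List α) (x : α) :
    PySem.List.sorted (m ++ [x]) key true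
      = PySem.List.insertBy (pvBef key) x (PySem.List.sorted m key true) := by
  rw [PySem.List.sorted_rev_eq_foldl_insertBy (m ++ [x]) key, List.foldl_append,
    ← PySem.List.sorted_rev_eq_foldl_insertBy m key]
  rfl

-- filtering commutes with the stable reverse sort
theorem pv_filter_sorted {α : Type} (key : α → Int) (q : α → Bool) (l : List α) :
    (PySem.List.sorted l key true).filter q = PySem.List.sorted (l.filter q) key true := by
  induction l using List.reverseRecOn with
  | nil => rfl
  | append_singleton l x ih =>
    by_cases hq : q x = true
    · have hfa : (l ++ [x]).filter q = l.filter q ++ [x] := by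
        rw [List.filter_append]; simp [hq]
      rw [pv_sorted_snoc, pv_filter_insertBy_pos key q x _ hq
        (PySem.List.sorted_pairwise_rev l key), ih, hfa, pv_sorted_snoc]
    · have hq' : q x = false := by simpa using hq
      have hfa : (l ++ [x]).filter q = l.filter q := by
        rw [List.filter_append]; simp [hq']
      rw [pv_sorted_snoc, pv_filter_insertBy_neg key q x _ hq', ih, hfa]

-- a strictly descending Int list splits at any pivot into >-part, the pivot (if present), <-part
theorem pv_split3 (k0 : Int) (L : List Int) (h : L.Pairwise (fun a b => b < a)) :
    L = L.filter (fun k => decide (k0 < k))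
      ++ (if k0 ∈ L then [k0] else [])
      ++ L.filter (fun k => decide (k < k0)) := by
  induction L with
  | nil => simp
  | cons a t ih =>
    rcases List.pairwise_cons.mp h with ⟨hhead, htail⟩
    rcases lt_trichotomy k0 a with hlt | heq | hgt
    · have hne : k0 ≠ a := by omega
      have hx2 : ¬ (a < k0) := by omega
      rw [List.filter_cons, List.filter_cons,
        if_pos (show (decide (k0 < a)) = true from by simpa using hlt),
        if_neg (show ¬ ((decide (a < k0)) = true) from by simpa using hx2)]
      have hmemif : (if k0 ∈ a :: t then [k0] else [])
          = (if k0 ∈ t then [k0] else []) := by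
        simp [List.mem_cons, hne]
      rw [hmemif, List.cons_append, List.cons_append]
      exact congrArg (a :: ·) (ih htail)
    · subst heq
      have hnt : k0 ∉ t := fun hm => absurd (hhead k0 hm) (by omega)
      have h1 : t.filter (fun k => decide (k0 < k)) = [] := by
        rw [List.filter_eq_nil_iff]
        intro k hk
        have := hhead k hk
        simp only [decide_eq_true_eq]; omega
      have h2 : t.filter (fun k => decide (k < k0)) = t := by
        rw [List.filter_eq_self]
        intro k hk
        have := hhead k hk
        simp only [decide_eq_true_eq]; omega
      simp [h1, h2, hnt]
    · have hall : ∀ k ∈ a :: t, k < k0 := by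
        intro k hk
        rcases List.mem_cons.mp hk with rfl | hkt
        · omega
        · have := hhead k hkt; omega
      have h1 : (a :: t).filter (fun k => decide (k0 < k)) = [] := by
        rw [List.filter_eq_nil_iff]
        intro k hk
        have := hall k hk
        simp only [decide_eq_true_eq]; omega
      have h2 : (a :: t).filter (fun k => decide (k < k0)) = a :: t := by
        rw [List.filter_eq_self]
        intro k hk
        have := hall k hk
        simp only [decide_eq_true_eq]; omega
      have hnm : k0 ∉ a :: t := fun hm => absurd (hall k0 hm) (by omega)
      rw [h1, h2, if_neg hnm]
      rfl

-- the descending sort of a duplicate-free Int list is strictly descending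
theorem pv_sorted_set_strict (S : List Int) (hnd : S.Nodup) :
    (PySem.List.sorted S (fun k => k) true).Pairwise (fun a b => b < a) := by
  have h1 := PySem.List.sorted_pairwise_rev S (fun k => k)
  have h2 : (PySem.List.sorted S (fun k => k) true).Nodup :=
    ((PySem.List.sorted_perm S (fun k => k) true).nodup_iff).mpr hnd
  exact (h1.and h2).imp (fun hab => lt_of_le_of_ne hab.1 hab.2.symm)

theorem pv_flatMap_congr {α β : Type} (K : List α) (g g' : α → List β)
    (h : ∀ k ∈ K, g k = g' k) : K.flatMap g = K.flatMap g' := by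
  induction K with
  | nil => rfl
  | cons a t ih =>
    rw [List.flatMap_cons, List.flatMap_cons, h a (by simp), ih (fun k hk => h k (by simp [hk]))]

theorem pv_mem_blocks {α : Type} (f : α → Int) (F : List α) (K : List Int) (y : α)
    (hy : y ∈ pvBlocks f F K) : f y ∈ K := by
  rcases List.mem_flatMap.mp hy with ⟨k, hk, hyk⟩
  rcases List.mem_filter.mp hyk with ⟨-, hfy⟩
  have : f y = k := by simpa using hfy
  rw [this]; exact hk

-- THE GROUPING THEOREM: the stable descending sort by f is the concatenation of the f-buckets,
-- taken along the distinct f-values in descending order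
theorem pv_grouping {α : Type} (f : α → Int) (F : List α) :
    PySem.List.sorted F f true
      = pvBlocks f F (PySem.List.sorted (PySem.Set.ofList (F.map f)) (fun k => k) true) := by
  induction F using List.reverseRecOn with
  | nil => rfl
  | append_singleton F x ih =>
    set k0 := f x with hk0
    set S := PySem.Set.ofList (F.map f) with hS
    set Kd := PySem.List.sorted S (fun k => k) true with hKd
    have hstrict : Kd.Pairwise (fun a b => b < a) :=
      pv_sorted_set_strict S (PySem.Set.nodup_ofList (F.map f))
    have hmemKd : ∀ k, k ∈ Kd ↔ k ∈ F.map f := by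
      intro k
      rw [hKd, PySem.List.mem_sorted]
      exact PySem.Set.mem_ofList (F.map f) k
    set Kg := Kd.filter (fun k => decide (k0 < k)) with hKg
    set Kl := Kd.filter (fun k => decide (k < k0)) with hKl
    have hKgmem : ∀ k ∈ Kg, k0 < k := by
      intro k hk; have := (List.mem_filter.mp hk).2; simpa using this
    have hKlmem : ∀ k ∈ Kl, k < k0 := by
      intro k hk; have := (List.mem_filter.mp hk).2; simpa using this
    have hsplit := pv_split3 k0 Kd hstrict
    rw [← hKg, ← hKl] at hsplit
    have hS' : PySem.Set.ofList ((F ++ [x]).map f) = PySem.Set.add S k0 := by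
      rw [List.map_append, List.map_singleton, pv_ofList_snoc]
    -- buckets of the extended list
    have hbucket' : ∀ k, pvBucket f (F ++ [x]) k
        = pvBucket f F k ++ (if k0 = k then [x] else []) := by
      intro k
      rw [pvBucket, pvBucket, List.filter_append]
      congr 1
      by_cases hk : k0 = k
      · have hfx : f x = k := by omega
        simp [hfx, hk]
      · have hfx : ¬ (f x = k) := by omega
        simp [hfx, hk]
    have hbucket'_hi : ∀ k ∈ Kg, pvBucket f (F ++ [x]) k = pvBucket f F k := by
      intro k hk
      rw [hbucket' k, if_neg (show ¬ (k0 = k) from by have := hKgmem k hk; omega)]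
      simp
    have hbucket'_lo : ∀ k ∈ Kl, pvBucket f (F ++ [x]) k = pvBucket f F k := by
      intro k hk
      rw [hbucket' k, if_neg (show ¬ (k0 = k) from by have := hKlmem k hk; omega)]
      simp
    -- where does x go: right after every block whose key is ≥ its own
    have hbefKg : ∀ y ∈ pvBlocks f F Kg, pvBef f x y = false := by
      intro y hy
      have := hKgmem _ (pv_mem_blocks f F Kg y hy)
      simp only [pvBef, ← hk0, decide_eq_false_iff_not, not_lt]; omega
    have hbefKl : ∀ y ∈ pvBlocks f F Kl, pvBef f x y = true := by
      intro y hy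
      have := hKlmem _ (pv_mem_blocks f F Kl y hy)
      simp only [pvBef, ← hk0, decide_eq_true_eq]; omega
    by_cases hmem : k0 ∈ F.map f
    · -- the key value already occurs: the key set and its descending sort are unchanged
      have hKd' : PySem.List.sorted (PySem.Set.ofList ((F ++ [x]).map f)) (fun k => k) true
          = Kd := by
        rw [hS', pv_add_of_mem S k0 ((PySem.Set.mem_ofList (F.map f) k0).mpr hmem)]
      rw [if_pos ((hmemKd k0).mpr hmem)] at hsplit
      rw [hKd', pv_sorted_snoc, ih, hsplit]
      have hblocksL : pvBlocks f F ((Kg ++ [k0]) ++ Kl)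
          = (pvBlocks f F Kg ++ pvBucket f F k0) ++ pvBlocks f F Kl := by
        simp [pvBlocks, List.flatMap_append]
      have hbefmid : ∀ y ∈ pvBlocks f F Kg ++ pvBucket f F k0, pvBef f x y = false := by
        intro y hy
        rcases List.mem_append.mp hy with hy | hy
        · exact hbefKg y hy
        · have : f y = k0 := by simpa using (List.mem_filter.mp hy).2
          simp [pvBef, ← hk0, this]
      have hblocksR : pvBlocks f (F ++ [x]) ((Kg ++ [k0]) ++ Kl)
          = (pvBlocks f F Kg ++ (pvBucket f F k0 ++ [x])) ++ pvBlocks f F Kl := by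
        rw [pvBlocks, List.flatMap_append, List.flatMap_append,
          pv_flatMap_congr Kg _ _ hbucket'_hi, pv_flatMap_congr Kl _ _ hbucket'_lo]
        simp [pvBlocks, hbucket' k0]
      rw [hblocksL, pv_insertBy_append f x _ _ hbefmid hbefKl, hblocksR]
      simp
    · -- a new key value: it is inserted between Kg and Kl, with a fresh singleton bucket [x]
      rw [if_neg (fun hm => hmem ((hmemKd k0).mp hm))] at hsplit
      have hKdsplit : Kd = Kg ++ Kl := by simpa using hsplit
      have hKd' : PySem.List.sorted (PySem.Set.ofList ((F ++ [x]).map f)) (fun k => k) true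
          = Kg ++ k0 :: Kl := by
        rw [hS', pv_add_of_not_mem S k0
          (fun hm => hmem ((PySem.Set.mem_ofList (F.map f) k0).mp hm))]
        apply PySem.List.sorted_rev_eq_of_perm_of_pairwise_gt
        · refine (List.perm_middle).trans ?_
          rw [← hKdsplit]
          exact ((PySem.List.sorted_perm S (fun k => k) true).cons k0).trans
            ((List.perm_append_singleton k0 S).symm)
        · have hKgp : Kg.Pairwise (fun a b => b < a) :=
            hstrict.sublist List.filter_sublist
          have hKlp : Kl.Pairwise (fun a b => b < a) :=
            hstrict.sublist List.filter_sublist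
          refine List.pairwise_append.mpr
            ⟨hKgp, List.pairwise_cons.mpr ⟨hKlmem, hKlp⟩, ?_⟩
          intro a ha b hb
          rcases List.mem_cons.mp hb with rfl | hb
          · exact hKgmem a ha
          · have h1 := hKgmem a ha
            have h2 := hKlmem b hb
            omega
      have hbucket0 : pvBucket f F k0 = [] := by
        rw [pvBucket, List.filter_eq_nil_iff]
        intro y hy hfy
        have hfy' : f y = k0 := by simpa using hfy
        exact hmem (hfy' ▸ List.mem_map_of_mem hy)
      rw [hKd', pv_sorted_snoc, ih, hKdsplit]
      have hblocksL : pvBlocks f F (Kg ++ Kl) = pvBlocks f F Kg ++ pvBlocks f F Kl := by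
        simp [pvBlocks, List.flatMap_append]
      have hblocksR : pvBlocks f (F ++ [x]) (Kg ++ k0 :: Kl)
          = pvBlocks f F Kg ++ (x :: pvBlocks f F Kl) := by
        rw [pvBlocks, List.flatMap_append, List.flatMap_cons,
          pv_flatMap_congr Kg _ _ hbucket'_hi, pv_flatMap_congr Kl _ _ hbucket'_lo]
        simp [pvBlocks, hbucket' k0, hbucket0]
      rw [hblocksL, pv_insertBy_append f x _ _ hbefKg hbefKl, hblocksR]

-- A's loop with invariant "ordered = seen (as a list)" is the seen-set fold over the filtered list
theorem pv_loopA (t : List (String × String)) :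
    ∀ (s : PySem.Set (String × String)),
    (List.foldl
      (fun (st : PySem.Set (String × String) × List (String × String)) pair =>
        if pair.1 == "" then st
        else if st.1.contains pair then st
        else (st.1.add pair, st.2 ++ [pair]))
      (s, s) t).2
    = List.foldl PySem.Set.add s (t.filter (fun p => !(p.1 == ""))) := by
  induction t with
  | nil => intro s; rfl
  | cons pair t' ih =>
    intro s
    rw [List.foldl_cons, List.filter_cons]
    by_cases he : (pair.1 == "") = true
    · rw [if_pos he, if_neg (show ¬((!(pair.1 == "")) = true) from by simp [he])]
      exact ih s
    · rw [if_neg he, if_pos (show (!(pair.1 == "")) = true from by simp [he])]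
      by_cases hc : (s.contains pair) = true
      · rw [if_pos hc, List.foldl_cons,
          pv_add_of_mem s pair ((pv_contains_iff s pair).mp hc)]
        exact ih s
      · have hnm : pair ∉ s := fun h => hc ((pv_contains_iff s pair).mpr h)
        rw [if_neg hc, List.foldl_cons, pv_add_of_not_mem s pair hnm]
        exact ih (s ++ [pair])

-- B's dedup loop with the same invariant (no emptiness test: filtering happened at bucket build)
theorem pv_loopB (t : List (String × String)) :
    ∀ (s : PySem.Set (String × String)),
    (List.foldl
      (fun (st : PySem.Set (String × String) × List (String × String)) pair =>
        if st.1.contains pair then st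
        else (st.1.add pair, st.2 ++ [pair]))
      (s, s) t).2
    = List.foldl PySem.Set.add s t := by
  induction t with
  | nil => intro s; rfl
  | cons pair t' ih =>
    intro s
    rw [List.foldl_cons, List.foldl_cons]
    by_cases hc : (s.contains pair) = true
    · rw [if_pos hc, pv_add_of_mem s pair ((pv_contains_iff s pair).mp hc)]
      exact ih s
    · have hnm : pair ∉ s := fun h => hc ((pv_contains_iff s pair).mpr h)
      rw [if_neg hc, pv_add_of_not_mem s pair hnm]
      exact ih (s ++ [pair])

-- a fold of inner folds over the buckets is one fold over the concatenated buckets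
theorem pv_foldl_flatMap {α β γ : Type} (K : List α) (h : α → List β) (g : γ → β → γ) :
    ∀ a, (K.flatMap h).foldl g a = K.foldl (fun x k => (h k).foldl g x) a := by
  induction K with
  | nil => intro a; rfl
  | cons x t ih =>
    intro a
    simp only [List.flatMap_cons, List.foldl_append, List.foldl_cons]
    exact ih _

-- B's bucket dict: every lookup is a bucket of the filtered list, the keys are its distinct lengths
theorem pv_buckets_getD (l : List (String × String)) (c : Int) :
    (pvBucketsOf l).getD c []
      = pvBucket (fun p => PySem.Str.len p.1) (l.filter (fun p => !(p.1 == ""))) c := by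
  have hfilter : pvBucketsOf l
      = List.foldl
          (fun d pair => d.modify (PySem.Str.len pair.1) [] (fun v => v ++ [pair]))
          PySem.Dict.empty (l.filter (fun p => !(p.1 == ""))) := by
    rw [pvBucketsOf, List.foldl_filter]
    congr 1
    funext d pair
    by_cases he : (pair.1 == "") = true
    · rw [if_pos he, if_neg (by simp [he])]
    · rw [if_neg he, if_pos (by simp [he])]
  have hmap : List.foldl
      (fun d pair => d.modify (PySem.Str.len pair.1) [] (fun v => v ++ [pair]))
      PySem.Dict.empty (l.filter (fun p => !(p.1 == "")))
    = List.foldl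
        (fun d (y : Int × (String × String)) => d.modify y.1 [] (fun v => v ++ [y.2]))
        PySem.Dict.empty
        ((l.filter (fun p => !(p.1 == ""))).map (fun p => (PySem.Str.len p.1, p))) := by
    rw [List.foldl_map]
  rw [hfilter, hmap, PySem.Dict.getD_foldl_modify_append, List.filter_map, List.map_map]
  simp [pvBucket, Function.comp_def]

theorem pv_buckets_keys (l : List (String × String)) :
    (pvBucketsOf l).keys
      = PySem.Set.ofList
          ((l.filter (fun p => !(p.1 == ""))).map (fun p => PySem.Str.len p.1)) := by
  have hfilter : pvBucketsOf l
      = List.foldl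
          (fun d pair => d.modify (PySem.Str.len pair.1) [] (fun v => v ++ [pair]))
          PySem.Dict.empty (l.filter (fun p => !(p.1 == ""))) := by
    rw [pvBucketsOf, List.foldl_filter]
    congr 1
    funext d pair
    by_cases he : (pair.1 == "") = true
    · rw [if_pos he, if_neg (by simp [he])]
    · rw [if_neg he, if_pos (by simp [he])]
  rw [hfilter, PySem.Dict.keys_foldl_modify_key]
  simp [PySem.Set.update, PySem.Set.ofList_eq_foldl]

-- ===== VERDICT (by name: the statement is the Claim_ definition above) =====
theorem dedupe_replacements_spec : Claim_equal_dedupe_replacements := by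
  intro l _
  unfold Spec_dedupe_replacements
  have hA : dedupe_replacements l
      = PySem.Set.ofList
          ((PySem.List.sorted l (fun p => PySem.Str.len p.1) true).filter
            (fun p => !(p.1 == ""))) := by
    unfold dedupe_replacements
    rw [show ((PySem.Set.empty : PySem.Set (String × String)), ([] : List (String × String)))
        = ((PySem.Set.empty : PySem.Set (String × String)),
           (PySem.Set.empty : List (String × String))) from rfl,
      pv_loopA, PySem.Set.ofList_eq_foldl]
    rfl
  have hB : dedupe_replacements_alt l
      = PySem.Set.ofList
          (pvBlocks (fun p => PySem.Str.len p.1) (l.filter (fun p => !(p.1 == "")))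
            (PySem.List.sorted
              (PySem.Set.ofList
                ((l.filter (fun p => !(p.1 == ""))).map (fun p => PySem.Str.len p.1)))
              (fun k => k) true)) := by
    unfold dedupe_replacements_alt
    rw [pv_buckets_keys l]
    simp only [pv_buckets_getD l]
    rw [show ((PySem.Set.empty : PySem.Set (String × String)), ([] : List (String × String)))
        = ((PySem.Set.empty : PySem.Set (String × String)),
           (PySem.Set.empty : List (String × String))) from rfl,
      ← pv_foldl_flatMap, pv_loopB, PySem.Set.ofList_eq_foldl]
    rfl
  rw [hA, hB, pv_filter_sorted, pv_grouping]
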